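-- pv_equiv track=rewrite | github.com/EDA-Teaching-RJH/assignment-mini-project-2-Meb50 | WordleSolver.py | filter_red
-- ===== SOURCE A (Python) =====
-- def filter_red(words, guess, result):
--     filtered = []
--
--     for word in words:
--         valid = True
--
--         for i in range(len(result)):
--             if result[i] == "r" and guess[i] in word:
--                 valid = False
--
--         if valid:
--             filtered.append(word)
--
--     return filtered
-- ===== SOURCE B (Python) =====
-- def filter_red(words, guess, result):
--     red = {guess[i] for i in range(len(result)) if result[i] == "r"}
--     return [word for word in words if red.isdisjoint(word)]
-- ===== Notes on version B (the rewrite author's own statement) =====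
-- stated objective: faster
-- what changed: B precomputes the set of red-marked guess letters once and keeps each word by a single set-disjointness test, removing A's per-word inner scan over result.
-- outside the precondition, e.g. on filter_red([], 'a', 'rr'): A returns [], B raises IndexError
import Mathlib
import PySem

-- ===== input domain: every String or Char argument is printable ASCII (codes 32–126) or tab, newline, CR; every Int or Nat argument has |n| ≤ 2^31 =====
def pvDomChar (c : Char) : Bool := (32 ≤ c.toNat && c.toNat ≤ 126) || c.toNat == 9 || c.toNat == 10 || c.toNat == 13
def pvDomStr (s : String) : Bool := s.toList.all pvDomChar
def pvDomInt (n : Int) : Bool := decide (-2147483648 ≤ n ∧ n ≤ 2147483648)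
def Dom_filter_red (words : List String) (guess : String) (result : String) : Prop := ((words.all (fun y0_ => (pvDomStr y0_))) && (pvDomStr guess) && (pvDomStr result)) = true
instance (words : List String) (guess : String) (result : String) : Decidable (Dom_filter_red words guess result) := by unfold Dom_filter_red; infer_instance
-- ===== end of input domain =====

-- B precomputes the set of red-marked guess letters once and keeps each word by one
-- set-disjointness test, dropping A's per-word inner scan over result (objective: simpler).

-- ===== PORT A =====
-- 'guess[i] in word' tests a single character's membership in word: ported as List.contains (exact for 1-char needles).
def filter_red (words : List String) (guess : String) (result : String) : List String :=
  words.foldl (fun filtered word =>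
    let valid := (PySem.List.pyRange 0 (PySem.Str.len result) 1).foldl
      (fun valid i =>
        if (PySem.List.pyGetD result.toList i ' ' == 'r')
            && word.toList.contains (PySem.List.pyGetD guess.toList i ' ')
        then false else valid) true
    if valid then filtered ++ [word] else filtered) []

-- ===== PORT B =====
def filter_red_alt (words : List String) (guess : String) (result : String) : List String :=
  let red : PySem.Set Char :=
    PySem.Set.ofList (((PySem.List.pyRange 0 (PySem.Str.len result) 1).filter
      (fun i => PySem.List.pyGetD result.toList i ' ' == 'r')).map
      (fun i => PySem.List.pyGetD guess.toList i ' '))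
  words.filter (fun word => PySem.Set.isdisjoint red word.toList)

-- ===== PRECONDITION & SPEC =====
-- Pre_ excludes inputs where result marks 'r' at a position beyond guess's length:
-- A raises IndexError there whenever words is nonempty, and B's eager red-set
-- construction raises even for empty words (where A returns []).
def Pre_filter_red (words : List String) (guess : String) (result : String) : Prop :=
  ∀ i : Nat, i < result.toList.length →
    result.toList.getD i ' ' = 'r' → i < guess.toList.length
instance (words : List String) (guess : String) (result : String) : Decidable (Pre_filter_red words guess result) := by unfold Pre_filter_red; infer_instance
def pvWitness_filter_red : List String × String × String := (["abc", "bcd"], "ab", "rg")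

def Spec_filter_red (words : List String) (guess : String) (result : String) (out : List String) : Prop := out = filter_red_alt words guess result
instance (words : List String) (guess : String) (result : String) (out : List String) : Decidable (Spec_filter_red words guess result out) := by unfold Spec_filter_red; infer_instance

-- ===== CLAIM (what is proved, stated in full; the proofs are below) =====
def Claim_equal_filter_red : Prop := ∀ (words : List String) (guess : String) (result : String), Dom_filter_red words guess result → Pre_filter_red words guess result → Spec_filter_red words guess result (filter_red words guess result)

-- ===== LEMMAS AND PROOFS =====

-- A's inner sticky-false loop is an 'all' over the traversed list.
theorem foldl_sticky_false {α : Type} (p : α → Bool) (l : List α) (v : Bool) :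
    l.foldl (fun acc x => if p x then false else acc) v = (v && l.all (fun x => !p x)) := by
  induction l generalizing v with
  | nil => simp
  | cons x t ih =>
    simp only [List.foldl_cons, List.all_cons, ih]
    by_cases h : p x = true <;> simp [h]

-- ===== VERDICT (by name: the statement is the Claim_ definition above) =====
theorem filter_red_spec : Claim_equal_filter_red := by
  intro words guess result _ _
  unfold Spec_filter_red filter_red filter_red_alt
  rw [PySem.List.foldl_congr_mem (g := fun filtered word =>
      if (PySem.List.pyRange 0 (PySem.Str.len result) 1).all
          (fun i => !((PySem.List.pyGetD result.toList i ' ' == 'r')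
              && word.toList.contains (PySem.List.pyGetD guess.toList i ' ')))
        then filtered ++ [word] else filtered)]
  · rw [PySem.List.foldl_append_if_eq_filter]
    simp only [List.nil_append]
    apply List.filter_congr
    intro word _
    rw [Bool.eq_iff_iff]
    rw [PySem.Set.isdisjoint_iff]
    simp only [List.all_eq_true, PySem.Set.mem_ofList, List.mem_map, List.mem_filter,
      PySem.List.mem_pyRange_one, Bool.not_eq_eq_eq_not, Bool.not_true, Bool.and_eq_false_iff,
      beq_iff_eq, beq_eq_false_iff_ne, ne_eq, List.contains_eq_mem, forall_exists_index, and_imp]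
    constructor
    · rintro h c i hi0 hilt hr rfl
      rcases h i hi0 hilt with h' | h'
      · exact absurd hr h'
      · simpa using h'
    · intro h i hi0 hilt
      by_cases hr : PySem.List.pyGetD result.toList i ' ' = 'r'
      · right
        simpa using fun hmem => h _ i hi0 hilt hr rfl hmem
      · left; exact hr
  · intro acc word _
    rw [foldl_sticky_false]
    simp
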